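-- pv_equiv track=rewrite | github.com/jklemmer08-gif/expert-octo-robot | ppp_analysis/ppp_generate_queue.py | parse_concatenated_ids
-- ===== SOURCE A (Python) =====
-- def parse_concatenated_ids(raw: str, valid_ids: set) -> list:
--     """
--     Parse concatenated IDs by trying different split strategies.
--     Uses valid_ids from Stash to validate.
--     """
--     raw = raw.strip().replace(" ", "").replace("\n", "")
--     found_ids = []
--
--     i = 0
--     while i < len(raw):
--         # Try 4-digit first, then 3-digit, then 2-digit, then 1-digit
--         matched = False
--         for length in [4, 3, 2, 1]:
--             if i + length <= len(raw):
--                 candidate = raw[i:i+length]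
--                 if candidate in valid_ids:
--                     found_ids.append(candidate)
--                     i += length
--                     matched = True
--                     break
--
--         if not matched:
--             # Skip this character and try again
--             i += 1
--
--     return found_ids
-- ===== SOURCE B (Python) =====
-- def parse_concatenated_ids(raw: str, valid_ids: set) -> list:
--     text = raw.strip().replace(" ", "").replace("\n", "")
--     # trie-style matcher: walk prefixes shortest-to-longest, pruning as soon as the
--     # current prefix extends no usable id; remember the longest accepting prefix
--     ids = {v for v in valid_ids if 0 < len(v) <= 4}
--     prefixes = {v[:k] for v in ids for k in range(1, len(v) + 1)}
--     out = []
--     pos = 0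
--     while pos < len(text):
--         node = ""
--         best = None
--         for c in text[pos:pos + 4]:
--             node += c
--             if node not in prefixes:
--                 break
--             if node in ids:
--                 best = node
--         if best is None:
--             pos += 1
--         else:
--             out.append(best)
--             pos += len(best)
--     return out
-- ===== Notes on version B (the rewrite author's own statement) =====
-- stated objective: alternative
-- what changed: B replaces A's per-position longest-to-shortest slice-and-set-membership probes by a trie-style matcher: it precomputes the set of all nonempty prefixes of the usable ids (length 1..4) and at each position extends the current prefix shortest-to-longest, pruning as soon as it leaves the prefix set and keeping the longest accepting prefix.
import Mathlib
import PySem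

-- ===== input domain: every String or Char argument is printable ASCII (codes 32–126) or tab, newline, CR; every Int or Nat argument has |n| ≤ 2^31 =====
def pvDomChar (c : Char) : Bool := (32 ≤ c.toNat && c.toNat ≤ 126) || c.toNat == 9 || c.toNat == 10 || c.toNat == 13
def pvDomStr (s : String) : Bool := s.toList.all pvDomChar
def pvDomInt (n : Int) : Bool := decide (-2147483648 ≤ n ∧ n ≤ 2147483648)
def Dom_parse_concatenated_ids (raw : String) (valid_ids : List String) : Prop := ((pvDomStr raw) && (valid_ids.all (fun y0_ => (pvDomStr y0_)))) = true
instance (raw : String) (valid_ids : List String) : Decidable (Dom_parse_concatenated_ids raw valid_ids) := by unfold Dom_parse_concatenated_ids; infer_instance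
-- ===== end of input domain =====

-- B replaces A's per-position longest-to-shortest slice+set-membership probes by a trie-style
-- matcher over a precomputed set of all nonempty prefixes of the usable ids, walking each
-- position shortest-to-longest with pruning; objective: alternative (no speed claim).


-- ===== PORT A =====
-- candidate = raw[i:i+length]
def pvACand (s : List Char) (i L : Nat) : String :=
  String.ofList (PySem.List.slice s (some (i : Int)) (some ((i : Int) + (L : Int))))

-- the inner 'for length in [4, 3, 2, 1]: … break' of A: first length that fits and whose
-- candidate is in valid_ids
def pvAFind (s : List Char) (valid_ids : List String) (i : Nat) : Option Nat :=
  [4, 3, 2, 1].find? (fun L => decide (i + L ≤ s.length) && valid_ids.contains (pvACand s i L))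

-- used only by pvALoop's decreasing_by
lemma pvAFind_pos (s : List Char) (valid_ids : List String) (i : Nat) {L : Nat}
    (h : pvAFind s valid_ids i = some L) : 0 < L := by
  have hm := List.mem_of_find?_eq_some h
  simp only [List.mem_cons, List.not_mem_nil, or_false] at hm
  rcases hm with h | h | h | h <;> omega

-- the outer while loop of A
def pvALoop (s : List Char) (valid_ids : List String) (i : Nat) (found_ids : List String) :
    List String :=
  if _hlt : i < s.length then
    match h : pvAFind s valid_ids i with
    | some L => pvALoop s valid_ids (i + L) (found_ids ++ [pvACand s i L])
    | none => pvALoop s valid_ids (i + 1) found_ids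
  else found_ids
termination_by s.length - i
decreasing_by
  · have := pvAFind_pos s valid_ids i h; omega
  · omega

def parse_concatenated_ids (raw : String) (valid_ids : List String) : List String :=
  let raw := PySem.Str.replace (PySem.Str.replace (PySem.Str.strip raw) " " "") "\n" ""
  pvALoop raw.toList valid_ids 0 []

-- ===== PORT B =====
-- ids = {v for v in valid_ids if 0 < len(v) <= 4}
def pvIds (valid_ids : List String) : PySem.Set String :=
  PySem.Set.ofList
    (valid_ids.filter (fun v => decide (0 < PySem.Str.len v) && decide (PySem.Str.len v ≤ 4)))

-- prefixes = {v[:k] for v in ids for k in range(1, len(v) + 1)}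
def pvPrefixes (valid_ids : List String) : PySem.Set String :=
  PySem.Set.ofList ((pvIds valid_ids).flatMap (fun v =>
    (PySem.List.pyRange 1 (PySem.Str.len v + 1) 1).map (fun k => PySem.Str.slice v none (some k))))

-- the inner 'for c in text[pos:pos+4]: node += c; …' with its break; node kept as List Char
def pvBScan (prefixes ids : PySem.Set String) :
    List Char → List Char → Option String → Option String
  | [], _, best => best
  | c :: rest, node, best =>
    let node := node ++ [c]
    if PySem.Set.contains prefixes (String.ofList node) = false then best
    else pvBScan prefixes ids rest node
      (if PySem.Set.contains ids (String.ofList node) = true then some (String.ofList node)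
       else best)

-- used only by pvBLoop's decreasing_by: a hit produced by the scan is nonempty
lemma pvBScan_pos (prefixes ids : PySem.Set String) :
    ∀ (cs node : List Char) (best : Option String),
      (∀ x, best = some x → 0 < x.toList.length) →
      ∀ s, pvBScan prefixes ids cs node best = some s → 0 < s.toList.length := by
  intro cs
  induction cs with
  | nil => intro node best hb s hs; exact hb s hs
  | cons c rest ih =>
    intro node best hb s hs
    rw [pvBScan] at hs
    split at hs
    · exact hb s hs
    · refine ih (node ++ [c]) _ ?_ s hs
      intro x hx
      split at hx
      · cases hx; simp
      · exact hb x hx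

-- the outer while loop of B
def pvBLoop (t : List Char) (prefixes ids : PySem.Set String) (pos : Nat) (out : List String) :
    List String :=
  if _hlt : pos < t.length then
    match h : pvBScan prefixes ids
        (PySem.List.slice t (some (pos : Int)) (some ((pos : Int) + 4))) [] none with
    | none => pvBLoop t prefixes ids (pos + 1) out
    | some best => pvBLoop t prefixes ids (pos + best.toList.length) (out ++ [best])
  else out
termination_by t.length - pos
decreasing_by
  · omega
  · have := pvBScan_pos prefixes ids _ [] none (by intro x hx; cases hx) best h; omega

def parse_concatenated_ids_alt (raw : String) (valid_ids : List String) : List String :=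
  let text := PySem.Str.replace (PySem.Str.replace (PySem.Str.strip raw) " " "") "\n" ""
  pvBLoop text.toList (pvPrefixes valid_ids) (pvIds valid_ids) 0 []

-- ===== PRECONDITION & SPEC =====
def Spec_parse_concatenated_ids (raw : String) (valid_ids : List String) (out : List String) : Prop := out = parse_concatenated_ids_alt raw valid_ids
instance (raw : String) (valid_ids : List String) (out : List String) : Decidable (Spec_parse_concatenated_ids raw valid_ids out) := by unfold Spec_parse_concatenated_ids; infer_instance

-- ===== CLAIM (what is proved, stated in full; the proofs are below) =====
def Claim_equal_parse_concatenated_ids : Prop := ∀ (raw : String) (valid_ids : List String), Dom_parse_concatenated_ids raw valid_ids → Spec_parse_concatenated_ids raw valid_ids (parse_concatenated_ids raw valid_ids)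

-- ===== LEMMAS AND PROOFS =====

-- membership in the usable-id set
lemma pvMem_pvIds (valid : List String) (x : String) :
    x ∈ pvIds valid ↔ x ∈ valid ∧ 1 ≤ x.toList.length ∧ x.toList.length ≤ 4 := by
  rw [pvIds, PySem.Set.mem_ofList, List.mem_filter]
  simp only [Bool.and_eq_true, decide_eq_true_eq, PySem.Str.len_eq]
  constructor
  · rintro ⟨h1, h2, h3⟩; exact ⟨h1, by omega, by omega⟩
  · rintro ⟨h1, h2, h3⟩; exact ⟨h1, by exact_mod_cast h2, by exact_mod_cast h3⟩

-- every nonempty prefix of a usable id is in the prefix set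
lemma pvMem_pvPrefixes (valid : List String) (v : String) (hv : v ∈ pvIds valid)
    (k : Nat) (h1 : 1 ≤ k) (hk : k ≤ v.toList.length) :
    String.ofList (v.toList.take k) ∈ pvPrefixes valid := by
  rw [pvPrefixes, PySem.Set.mem_ofList, List.mem_flatMap]
  refine ⟨v, hv, ?_⟩
  rw [List.mem_map]
  refine ⟨(k : Int), ?_, ?_⟩
  · rw [PySem.List.mem_pyRange_one]
    simp only [PySem.Str.len_eq]
    constructor
    · exact_mod_cast h1
    · omega
  · apply String.toList_injective
    have : (PySem.Str.slice v none (some (k : Int))).toList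
        = PySem.List.slice v.toList none (some (k : Int)) := by
      simp [PySem.Str.toList_slice]
    rw [this, PySem.List.slice_to_natCast]
    simp

-- find? over a key-descending list returns a match of maximal key
lemma pvFind?_max_key {α κ : Type} [LinearOrder κ] {key : α → κ} {P : α → Bool} {l : List α}
    (hpw : l.Pairwise (fun a b => key b ≤ key a)) {m : α} (hm : l.find? P = some m) :
    ∀ q ∈ l, P q = true → key q ≤ key m := by
  rcases List.find?_eq_some_iff_append.mp hm with ⟨hPm, as, bs, rfl, hfail⟩
  intro q hq hPq
  rcases List.mem_append.mp hq with hq | hq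
  · exact absurd hPq (by simpa using hfail q hq)
  · rcases List.mem_cons.mp hq with rfl | hq
    · exact le_refl _
    · have := (List.pairwise_append.mp hpw).2.1
      exact (List.pairwise_cons.mp this).1 q hq

lemma pvContains_iff (l : List String) (x : String) : l.contains x = true ↔ x ∈ l := by
  simp

-- characterisation of pvAFind = some L
lemma pvAFind_some (s : List Char) (valid : List String) (i : Nat) {L : Nat}
    (h : pvAFind s valid i = some L) :
    (1 ≤ L ∧ L ≤ 4) ∧ i + L ≤ s.length ∧ pvACand s i L ∈ valid ∧
      ∀ L' , 1 ≤ L' → L' ≤ 4 → i + L' ≤ s.length → pvACand s i L' ∈ valid → L' ≤ L := by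
  have hmemL := List.mem_of_find?_eq_some h
  have hPL := List.find?_some h
  simp only [Bool.and_eq_true, decide_eq_true_eq, pvContains_iff] at hPL
  have hL14 : 1 ≤ L ∧ L ≤ 4 := by
    simp only [List.mem_cons, List.not_mem_nil, or_false] at hmemL
    rcases hmemL with h | h | h | h <;> omega
  refine ⟨hL14, hPL.1, hPL.2, ?_⟩
  intro L' h1 h4 hfit hmem
  have hpw : ([4,3,2,1] : List Nat).Pairwise (fun a b => (id b : Nat) ≤ id a) := by decide
  have := pvFind?_max_key (key := fun x => (id x : Nat)) hpw h L'
    (by simp only [List.mem_cons]; omega)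
    (by simp only [Bool.and_eq_true, decide_eq_true_eq, pvContains_iff]; exact ⟨hfit, hmem⟩)
  simpa using this

-- characterisation of pvAFind = none
lemma pvAFind_none (s : List Char) (valid : List String) (i : Nat)
    (h : pvAFind s valid i = none) :
    ∀ L, 1 ≤ L → L ≤ 4 → ¬(i + L ≤ s.length ∧ pvACand s i L ∈ valid) := by
  intro L h1 h4 ⟨hfit, hmem⟩
  have := List.find?_eq_none.mp h L (by simp only [List.mem_cons]; omega)
  simp only [Bool.and_eq_true, decide_eq_true_eq, pvContains_iff, not_and] at this
  exact this hfit hmem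

-- the candidate at position i of length L, when it fits, is take L (drop i)
lemma pvACand_toList (s : List Char) (i L : Nat) :
    (pvACand s i L).toList = (s.drop i).take L := by
  simp [pvACand, PySem.List.slice_natCast_add]

-- scan lemma (a): with no match anywhere in the window, the scan keeps its accumulator
lemma pvBScan_of_no_match (prefixes ids : PySem.Set String) :
    ∀ (cs node : List Char) (best : Option String),
      (∀ j, 1 ≤ j → j ≤ cs.length → String.ofList (node ++ cs.take j) ∉ ids) →
      pvBScan prefixes ids cs node best = best := by
  intro cs
  induction cs with
  | nil => intro node best _; rw [pvBScan]
  | cons c rest ih =>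
    intro node best hno
    rw [pvBScan]
    split
    · rfl
    · have h1 : String.ofList (node ++ [c]) ∉ ids := by
        have := hno 1 le_rfl (by simp)
        simpa using this
      have hcontains : PySem.Set.contains ids (String.ofList (node ++ [c])) ≠ true := by
        simp only [ne_eq, PySem.Set.contains_iff]; exact h1
      rw [if_neg hcontains]
      apply ih
      intro j hj1 hjlen hmem
      refine hno (j + 1) (by omega) (by simpa using hjlen) ?_
      simpa [List.append_assoc] using hmem

-- scan lemma (b): with a maximal match of length j, the scan returns exactly it
lemma pvBScan_of_match (valid : List String) :
    ∀ (cs node : List Char) (best : Option String) (j : Nat),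
      (hC : ∀ a k, 1 ≤ k → k ≤ a → a ≤ cs.length →
        String.ofList (node ++ cs.take a) ∈ pvIds valid →
        String.ofList (node ++ cs.take k) ∈ pvPrefixes valid) →
      (hj1 : 1 ≤ j) → (hjlen : j ≤ cs.length) →
      (hmem : String.ofList (node ++ cs.take j) ∈ pvIds valid) →
      (hmax : ∀ a, j < a → a ≤ cs.length → String.ofList (node ++ cs.take a) ∉ pvIds valid) →
      pvBScan (pvPrefixes valid) (pvIds valid) cs node best
        = some (String.ofList (node ++ cs.take j)) := by
  intro cs
  induction cs with
  | nil => intro node best j _ hj1 hjlen _ _; simp at hjlen; omega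
  | cons c rest ih =>
    intro node best j hC hj1 hjlen hmem hmax
    rw [pvBScan]
    have hpre : String.ofList (node ++ [c]) ∈ pvPrefixes valid := by
      have := hC j 1 le_rfl hj1 hjlen hmem
      simpa using this
    rw [if_neg (by rw [Bool.not_eq_false, PySem.Set.contains_iff]; exact hpre)]
    by_cases hj : j = 1
    · subst hj
      have hm1 : String.ofList (node ++ [c]) ∈ pvIds valid := by simpa using hmem
      rw [if_pos (by rw [PySem.Set.contains_iff]; exact hm1)]
      rw [pvBScan_of_no_match]
      · simp
      · intro a ha1 halen hmem'
        refine hmax (a + 1) (by omega) (by simpa using halen) ?_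
        simpa [List.append_assoc] using hmem'
    · have hj2 : 2 ≤ j := by omega
      have htk : (c :: rest).take j = c :: rest.take (j - 1) := by
        rw [show j = (j - 1) + 1 by omega, List.take_succ_cons]
        simp
      have hlist : node ++ (c :: rest).take j = (node ++ [c]) ++ rest.take (j - 1) := by
        rw [htk]
        simp [List.append_assoc]
      rw [hlist]
      apply ih
      · intro a k hk1 hka halen hmema
        have := hC (a + 1) (k + 1) (by omega) (by omega) (by simp; omega)
          (by simpa [List.append_assoc] using hmema)
        simpa [List.append_assoc] using this
      · omega
      · simp at hjlen ⊢; omega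
      · rw [← hlist]; exact hmem
      · intro a ha halen hmema
        refine hmax (a + 1) (by omega) (by simp; omega) ?_
        simpa [List.append_assoc] using hmema

-- the per-position steps agree
lemma pvStep_eq (s : List Char) (valid : List String) (pos : Nat) (hpos : pos < s.length) :
    pvBScan (pvPrefixes valid) (pvIds valid)
        (PySem.List.slice s (some (pos : Int)) (some ((pos : Int) + 4))) [] none
      = (pvAFind s valid pos).map (fun L => pvACand s pos L) := by
  have hw : PySem.List.slice s (some (pos : Int)) (some ((pos : Int) + 4))
      = (s.drop pos).take 4 := by
    rw [show ((pos : Int) + 4) = ((pos : Int) + ((4 : Nat) : Int)) by norm_num,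
      PySem.List.slice_natCast_add]
  rw [hw]
  have hwtake : ∀ j : Nat, j ≤ 4 → ((s.drop pos).take 4).take j = (s.drop pos).take j := by
    intro j hj; rw [List.take_take]; congr 1; omega
  have hwlen : ((s.drop pos).take 4).length = min 4 (s.length - pos) := by simp
  -- membership of window prefixes as A-candidates
  have hcand : ∀ j : Nat, 1 ≤ j → j ≤ ((s.drop pos).take 4).length →
      (String.ofList (((s.drop pos).take 4).take j) = pvACand s pos j ∧
       pos + j ≤ s.length) := by
    intro j hj1 hjlen
    have hj4 : j ≤ 4 := by omega
    constructor
    · apply String.toList_injective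
      rw [pvACand_toList]
      simp [hwtake j hj4]
    · omega
  rcases hA : pvAFind s valid pos with _ | L
  · rw [Option.map_none]
    apply pvBScan_of_no_match
    intro j hj1 hjlen hmem
    obtain ⟨hcj, hfit⟩ := hcand j hj1 hjlen
    simp only [List.nil_append] at hmem
    rw [hcj] at hmem
    rw [pvMem_pvIds] at hmem
    obtain ⟨hv, h1, h4⟩ := hmem
    rw [pvACand_toList] at h1 h4
    have hlen : ((s.drop pos).take j).length = j := by simp; omega
    exact pvAFind_none s valid pos hA j (by omega) (by omega) ⟨by omega, hv⟩
  · rw [Option.map_some]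
    obtain ⟨⟨h1, h4⟩, hfit, hmem, hmax⟩ := pvAFind_some s valid pos hA
    have hjlen : L ≤ ((s.drop pos).take 4).length := by rw [hwlen]; omega
    have hCL := hcand L h1 hjlen
    rw [pvBScan_of_match valid _ [] none L ?hC h1 hjlen ?hm ?hmx]
    · simp only [List.nil_append]
      rw [hCL.1]
    case hm =>
      simp only [List.nil_append]
      rw [hCL.1, pvMem_pvIds]
      refine ⟨hmem, ?_, ?_⟩ <;> rw [pvACand_toList] <;> simp <;> omega
    case hmx =>
      intro a ha halen hmema
      simp only [List.nil_append] at hmema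
      rw [(hcand a (by omega) halen).1, pvMem_pvIds] at hmema
      obtain ⟨hv, ha1, ha4⟩ := hmema
      rw [pvACand_toList] at ha1 ha4
      have : pos + a ≤ s.length := by rw [hwlen] at halen; omega
      have := hmax a (by omega) (by simp at ha4; omega) this hv
      omega
    case hC =>
      intro a k hk1 hka halen hmema
      simp only [List.nil_append] at hmema ⊢
      rw [(hcand a (by omega) halen).1] at hmema
      have hvmem := hmema
      have hk4 : k ≤ 4 := by rw [hwlen] at halen; omega
      have ha4 : a ≤ 4 := by rw [hwlen] at halen; omega
      have : ((s.drop pos).take 4).take k = (pvACand s pos a).toList.take k := by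
        rw [pvACand_toList, hwtake k hk4]
        rw [List.take_take, Nat.min_eq_left hka]
      rw [this]
      apply pvMem_pvPrefixes valid _ hvmem k hk1
      rw [pvACand_toList]
      simp
      rw [hwlen] at halen
      omega

-- the two loops agree from any position
lemma pvLoops_eq (s : List Char) (valid : List String) :
    ∀ (k i : Nat) (acc : List String), s.length - i ≤ k →
      pvALoop s valid i acc = pvBLoop s (pvPrefixes valid) (pvIds valid) i acc := by
  intro k
  induction k with
  | zero =>
    intro i acc hk
    rw [pvALoop, pvBLoop]
    have : ¬ i < s.length := by omega
    simp [this]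
  | succ k ih =>
    intro i acc hk
    rw [pvALoop, pvBLoop]
    by_cases hlt : i < s.length
    · simp only [hlt, dif_pos]
      rcases hA : pvAFind s valid i with _ | L
      · rw [pvStep_eq s valid i hlt, hA, Option.map_none]
        exact ih (i + 1) acc (by omega)
      · rw [pvStep_eq s valid i hlt, hA, Option.map_some]
        have hfit := (pvAFind_some s valid i hA).2.1
        have hlen : (pvACand s i L).toList.length = L := by
          rw [pvACand_toList]; simp; omega
        show pvALoop s valid (i + L) (acc ++ [pvACand s i L])
          = pvBLoop s (pvPrefixes valid) (pvIds valid)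
              (i + (pvACand s i L).toList.length) (acc ++ [pvACand s i L])
        rw [hlen]
        exact ih (i + L) (acc ++ [pvACand s i L]) (by have := pvAFind_pos s valid i hA; omega)
    · simp [hlt]

-- ===== VERDICT (by name: the statement is the Claim_ definition above) =====
theorem parse_concatenated_ids_spec : Claim_equal_parse_concatenated_ids := by
  intro raw valid_ids _
  unfold Spec_parse_concatenated_ids parse_concatenated_ids parse_concatenated_ids_alt
  exact pvLoops_eq _ valid_ids _ 0 [] (le_refl _)
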